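-- pv_equiv track=rewrite | github.com/edgardeitor/Amplitude-equations-bulk-surface-RD-equations | functions.py | add_2_up_to_m
-- ===== SOURCE A (Python) =====
-- def add_2_up_to_m(ell, m):
--     '''This function returns the set of pairs of numbers between -l and l that add up to m'''
--     set_check = []
--     non_repeated_list = []
--     for q1 in range(-ell, ell + 1):
--         q2 = m - q1
--         if -ell <= q2 <= ell and {q1, q2} not in set_check:
--             set_check.append({q1, q2})
--             non_repeated_list.append([q1, q2])
--     return non_repeated_list
-- ===== SOURCE B (Python) =====
-- def add_2_up_to_m(ell, m):
--     '''Single pass: q2 is determined by q1, and keeping only q1 <= q2 canonicalizes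
--     each unordered pair to its smaller-first representative, so no seen-set is needed.'''
--     return [[q1, m - q1] for q1 in range(-ell, ell + 1)
--             if -ell <= m - q1 <= ell and q1 <= m - q1]
-- ===== Notes on version B (the rewrite author's own statement) =====
-- stated objective: faster
-- what changed: Replaced the quadratic seen-set scan (list of Python sets searched linearly each iteration) by a single comprehension that keeps a pair iff q1 <= m - q1, which canonicalizes each unordered pair directly.
import Mathlib
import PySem

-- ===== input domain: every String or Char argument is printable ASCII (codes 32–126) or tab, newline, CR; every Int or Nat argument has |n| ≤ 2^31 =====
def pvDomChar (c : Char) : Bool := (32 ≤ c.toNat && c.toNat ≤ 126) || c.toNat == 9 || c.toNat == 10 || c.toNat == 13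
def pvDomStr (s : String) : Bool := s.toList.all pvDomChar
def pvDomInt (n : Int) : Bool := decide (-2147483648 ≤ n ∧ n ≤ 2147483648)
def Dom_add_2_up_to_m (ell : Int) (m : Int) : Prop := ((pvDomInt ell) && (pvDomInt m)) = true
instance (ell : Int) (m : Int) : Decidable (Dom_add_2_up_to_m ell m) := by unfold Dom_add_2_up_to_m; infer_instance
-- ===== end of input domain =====

-- B replaces A's quadratic seen-set scan by a single pass keeping a pair iff q1 ≤ m - q1 (faster in a timing run's mechanism: the inner scan disappears).

-- ===== PORT A =====
-- the for-loop over range(-ell, ell+1) carrying (set_check, non_repeated_list)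
def aLoop (ell m : Int) : List Int → List (PySem.Set Int) → List (List Int) → List (List Int)
  | [], _check, acc => acc
  | q1 :: rest, check, acc =>
    let q2 := m - q1
    if (-ell ≤ q2 ∧ q2 ≤ ell) ∧ ¬ check.any (fun s => PySem.Set.equal s (PySem.Set.ofList [q1, q2])) then
      aLoop ell m rest (check ++ [PySem.Set.ofList [q1, q2]]) (acc ++ [[q1, q2]])
    else
      aLoop ell m rest check acc

def add_2_up_to_m (ell : Int) (m : Int) : List (List Int) :=
  aLoop ell m (PySem.List.pyRange (-ell) (ell + 1) 1) [] []

-- ===== PORT B =====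
def add_2_up_to_m_alt (ell : Int) (m : Int) : List (List Int) :=
  (PySem.List.pyRange (-ell) (ell + 1) 1).filterMap
    (fun q1 => if -ell ≤ m - q1 ∧ m - q1 ≤ ell ∧ q1 ≤ m - q1 then some [q1, m - q1] else none)

-- ===== PRECONDITION & SPEC =====
def Spec_add_2_up_to_m (ell : Int) (m : Int) (out : List (List Int)) : Prop := out = add_2_up_to_m_alt ell m
instance (ell : Int) (m : Int) (out : List (List Int)) : Decidable (Spec_add_2_up_to_m ell m out) := by unfold Spec_add_2_up_to_m; infer_instance

-- ===== CLAIM (what is proved, stated in full; the proofs are below) =====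
def Claim_equal_add_2_up_to_m : Prop := ∀ (ell : Int) (m : Int), Dom_add_2_up_to_m ell m → Spec_add_2_up_to_m ell m (add_2_up_to_m ell m)

-- ===== LEMMAS AND PROOFS =====

lemma equal_pair_iff (a b c d : Int) :
    PySem.Set.equal (PySem.Set.ofList [a, b]) (PySem.Set.ofList [c, d]) = true ↔
      (∀ x : Int, (x = a ∨ x = b) ↔ (x = c ∨ x = d)) := by
  rw [PySem.Set.equal_iff]
  constructor
  · intro h x
    have := h x
    simpa [PySem.Set.mem_ofList] using this
  · intro h x
    simpa [PySem.Set.mem_ofList] using h x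

lemma aLoop_main (ell m : Int) : ∀ (n : Nat) (lo : Int), (ell + 1 - lo).toNat = n → -ell ≤ lo →
    ∀ (check : List (PySem.Set Int)) (acc : List (List Int)),
    (∀ s ∈ check, ∃ q, -ell ≤ q ∧ q < lo ∧ q ≤ m - q ∧ -ell ≤ m - q ∧ m - q ≤ ell ∧
        s = PySem.Set.ofList [q, m - q]) →
    (∀ q, -ell ≤ q → q < lo → q ≤ m - q → -ell ≤ m - q → m - q ≤ ell →
        PySem.Set.ofList [q, m - q] ∈ check) →
    aLoop ell m (PySem.List.pyRange lo (ell + 1) 1) check acc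
      = acc ++ (PySem.List.pyRange lo (ell + 1) 1).filterMap
          (fun q1 => if -ell ≤ m - q1 ∧ m - q1 ≤ ell ∧ q1 ≤ m - q1 then some [q1, m - q1] else none) := by
  intro n
  induction n with
  | zero =>
    intro lo hn _ check acc _ _
    have hle : ell + 1 ≤ lo := by omega
    rw [PySem.List.pyRange_one_eq_nil hle]
    simp [aLoop]
  | succ k ih =>
    intro lo hn hlo check acc hmem hcov
    have hlt : lo < ell + 1 := by omega
    rw [PySem.List.pyRange_one_cons hlt]
    by_cases hin : -ell ≤ m - lo ∧ m - lo ≤ ell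
    · by_cases hord : lo ≤ m - lo
      · -- fresh pair: membership test must be false
        have hany : check.any (fun s => PySem.Set.equal s (PySem.Set.ofList [lo, m - lo])) = false := by
          rw [List.any_eq_false]
          intro s hs
          obtain ⟨q, hq1, hq2, hq3, hq4, hq5, rfl⟩ := hmem s hs
          intro heq
          have h := (equal_pair_iff q (m - q) lo (m - lo)).mp heq lo
          simp at h
          omega
        simp only [aLoop, hany]
        rw [if_pos ⟨hin, by simp⟩]
        rw [ih (lo + 1) (by omega) (by omega)]
        · rw [List.filterMap_cons, if_pos (show -ell ≤ m - lo ∧ m - lo ≤ ell ∧ lo ≤ m - lo from ⟨hin.1, hin.2, hord⟩)]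
          simp
        · intro s hs
          rcases List.mem_append.mp hs with h | h
          · obtain ⟨q, hq⟩ := hmem s h
            exact ⟨q, by tauto, by omega, by tauto, by tauto, by tauto, by tauto⟩
          · simp at h
            exact ⟨lo, hlo, by omega, hord, hin.1, hin.2, h⟩
        · intro q h1 h2 h3 h4 h5
          rcases (by omega : q < lo ∨ q = lo) with h | rfl
          · exact List.mem_append.mpr (Or.inl (hcov q h1 h h3 h4 h5))
          · simp
      · -- m - lo < lo: the pair was seen at iteration q = m - lo
        have hseen : PySem.Set.ofList [m - lo, m - (m - lo)] ∈ check := by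
          apply hcov (m - lo) hin.1 (by omega) (by omega) (by omega) (by omega)
        have hany : check.any (fun s => PySem.Set.equal s (PySem.Set.ofList [lo, m - lo])) = true := by
          rw [List.any_eq_true]
          refine ⟨_, hseen, ?_⟩
          rw [equal_pair_iff]
          intro x
          constructor <;> intro h <;> omega
        simp only [aLoop, hany]
        rw [if_neg (by simp)]
        rw [ih (lo + 1) (by omega) (by omega)]
        · rw [List.filterMap_cons, if_neg (show ¬ (-ell ≤ m - lo ∧ m - lo ≤ ell ∧ lo ≤ m - lo) by omega)]
        · intro s hs
          obtain ⟨q, hq⟩ := hmem s hs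
          exact ⟨q, by tauto, by omega, by tauto, by tauto, by tauto, by tauto⟩
        · intro q h1 h2 h3 h4 h5
          rcases (by omega : q < lo ∨ q = lo) with h | rfl
          · exact hcov q h1 h h3 h4 h5
          · omega
    · -- q2 out of [-ell, ell]: both sides skip
      simp only [aLoop]
      rw [if_neg (by tauto)]
      rw [ih (lo + 1) (by omega) (by omega)]
      · rw [List.filterMap_cons, if_neg (show ¬ (-ell ≤ m - lo ∧ m - lo ≤ ell ∧ lo ≤ m - lo) by tauto)]
      · intro s hs
        obtain ⟨q, hq⟩ := hmem s hs
        exact ⟨q, by tauto, by omega, by tauto, by tauto, by tauto, by tauto⟩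
      · intro q h1 h2 h3 h4 h5
        rcases (by omega : q < lo ∨ q = lo) with h | rfl
        · exact hcov q h1 h h3 h4 h5
        · omega

-- ===== VERDICT (by name: the statement is the Claim_ definition above) =====
theorem add_2_up_to_m_spec : Claim_equal_add_2_up_to_m := by
  intro ell m _
  unfold Spec_add_2_up_to_m add_2_up_to_m add_2_up_to_m_alt
  rw [aLoop_main ell m (ell + 1 - (-ell)).toNat (-ell) rfl le_rfl [] []]
  · simp
  · simp
  · intro q h1 h2; omega
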